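-- pv_equiv track=rewrite | github.com/Krishna8452/AI_Recruitment_System. | src/preprocessing/resume_processor.py | extract_skill_flags
-- ===== SOURCE A (Python) =====
-- def extract_skill_flags(skills_str: str) -> dict:
--     """Create binary flags for key skills from pipe-delimited skill string."""
--     if not isinstance(skills_str, str):
--         return {}
--     skills_lower = set(s.strip().lower() for s in skills_str.split("|"))
--     flags = {}
--     for skill in ["Python", "Machine Learning", "SQL", "Java",
--                   "Deep Learning", "Communication", "Leadership",
--                   "Project Management", "Data Analysis"]:
--         flags[f"skill_{skill.lower().replace(' ', '_')}"] = (
--             1 if skill.lower() in skills_lower else 0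
--         )
--     return flags
-- ===== SOURCE B (Python) =====
-- _SKILLS = ["Python", "Machine Learning", "SQL", "Java",
--            "Deep Learning", "Communication", "Leadership",
--            "Project Management", "Data Analysis"]
-- # token (lowercased skill name) -> flag key
-- _SKILL_KEY = {s.lower(): "skill_" + s.lower().replace(" ", "_") for s in _SKILLS}
--
--
-- def extract_skill_flags(skills_str: str) -> dict:
--     """Create binary flags for key skills from pipe-delimited skill string."""
--     if not isinstance(skills_str, str):
--         return {}
--     flags = {key: 0 for key in _SKILL_KEY.values()}
--     for token in skills_str.split("|"):
--         key = _SKILL_KEY.get(token.strip().lower())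
--         if key is not None:
--             flags[key] = 1
--     return flags
-- ===== Notes on version B (the rewrite author's own statement) =====
-- stated objective: alternative
-- what changed: A builds a set of all tokens and then tests each of the nine skills against it; B pre-initializes all nine flags to 0 and makes one pass over the tokens, looking each token up in a precomputed token-to-flag-key dict and setting the matched flag to 1.
import Mathlib
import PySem

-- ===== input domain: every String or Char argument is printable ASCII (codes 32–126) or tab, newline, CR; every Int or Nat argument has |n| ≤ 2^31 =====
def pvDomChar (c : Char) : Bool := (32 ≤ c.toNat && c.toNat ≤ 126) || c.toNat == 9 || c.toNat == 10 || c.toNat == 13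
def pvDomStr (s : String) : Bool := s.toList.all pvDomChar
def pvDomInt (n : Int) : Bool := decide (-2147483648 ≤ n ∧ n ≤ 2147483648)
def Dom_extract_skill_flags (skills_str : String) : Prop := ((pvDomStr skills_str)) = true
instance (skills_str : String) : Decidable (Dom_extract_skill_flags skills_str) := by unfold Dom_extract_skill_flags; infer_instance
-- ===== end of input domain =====

-- B replaces A's set-of-tokens + per-skill membership test by a zero-initialized flag dict
-- updated in one pass over the tokens via a token->flag-key lookup dict (alternative decomposition).


-- ===== PORT A =====
def pvSkillsA : List String :=
  ["Python", "Machine Learning", "SQL", "Java",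
   "Deep Learning", "Communication", "Leadership",
   "Project Management", "Data Analysis"]

def extract_skill_flags (skills_str : String) : List (String × Int) :=
  let skills_lower : PySem.Set String :=
    PySem.Set.ofList ((((PySem.Str.split? skills_str "|").getD [])).map
      (fun s => PySem.Str.lower (PySem.Str.strip s)))
  let flags : PySem.Dict String Int :=
    pvSkillsA.foldl (fun d skill =>
      d.insert ("skill_" ++ PySem.Str.replace (PySem.Str.lower skill) " " "_")
        (if PySem.Set.contains skills_lower (PySem.Str.lower skill) then (1 : Int) else 0))
      PySem.Dict.empty
  flags.items

-- ===== PORT B =====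
def pvSkillsB : List String :=
  ["Python", "Machine Learning", "SQL", "Java",
   "Deep Learning", "Communication", "Leadership",
   "Project Management", "Data Analysis"]

-- _SKILL_KEY: lowercased skill name -> flag key (dict comprehension)
def pvSkillKey : PySem.Dict String String :=
  pvSkillsB.foldl (fun d s =>
    d.insert (PySem.Str.lower s)
      ("skill_" ++ PySem.Str.replace (PySem.Str.lower s) " " "_"))
    PySem.Dict.empty

def extract_skill_flags_alt (skills_str : String) : List (String × Int) :=
  let flags0 : PySem.Dict String Int :=
    (PySem.Dict.values pvSkillKey).foldl (fun d k => d.insert k (0 : Int)) PySem.Dict.empty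
  let flags : PySem.Dict String Int :=
    (((PySem.Str.split? skills_str "|").getD [])).foldl (fun d token =>
      match pvSkillKey.get? (PySem.Str.lower (PySem.Str.strip token)) with
      | some k => d.insert k (1 : Int)
      | none => d) flags0
  flags.items

-- ===== PRECONDITION & SPEC =====
def Spec_extract_skill_flags (skills_str : String) (out : List (String × Int)) : Prop := out = extract_skill_flags_alt skills_str
instance (skills_str : String) (out : List (String × Int)) : Decidable (Spec_extract_skill_flags skills_str out) := by unfold Spec_extract_skill_flags; infer_instance

-- ===== CLAIM (what is proved, stated in full; the proofs are below) =====
def Claim_equal_extract_skill_flags : Prop := ∀ (skills_str : String), Dom_extract_skill_flags skills_str → Spec_extract_skill_flags skills_str (extract_skill_flags skills_str)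

-- ===== LEMMAS AND PROOFS =====

-- the common intermediate shape: the nine flag keys with symbolic values
def pvCanon (a b c d e f g h i : Int) : PySem.Dict String Int :=
  PySem.Dict.mk
    [("skill_python", a), ("skill_machine_learning", b), ("skill_sql", c),
     ("skill_java", d), ("skill_deep_learning", e), ("skill_communication", f),
     ("skill_leadership", g), ("skill_project_management", h), ("skill_data_analysis", i)]

def pvMem (ts : List String) (n : String) : Int := if n ∈ ts then 1 else 0

lemma A_canon (ts : List String) :
    pvSkillsA.foldl (fun d skill =>
      d.insert ("skill_" ++ PySem.Str.replace (PySem.Str.lower skill) " " "_")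
        (if PySem.Set.contains (PySem.Set.ofList ts) (PySem.Str.lower skill) then (1 : Int) else 0))
      PySem.Dict.empty
    = pvCanon (pvMem ts "python") (pvMem ts "machine learning") (pvMem ts "sql")
        (pvMem ts "java") (pvMem ts "deep learning") (pvMem ts "communication")
        (pvMem ts "leadership") (pvMem ts "project management") (pvMem ts "data analysis") := by
  have l0 : PySem.Str.lower "Python" = "python" := by decide
  have k0 : PySem.Str.replace "python" " " "_" = "python" := by decide
  have a0 : "skill_" ++ "python" = "skill_python" := by decide
  have l1 : PySem.Str.lower "Machine Learning" = "machine learning" := by decide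
  have k1 : PySem.Str.replace "machine learning" " " "_" = "machine_learning" := by decide
  have a1 : "skill_" ++ "machine_learning" = "skill_machine_learning" := by decide
  have l2 : PySem.Str.lower "SQL" = "sql" := by decide
  have k2 : PySem.Str.replace "sql" " " "_" = "sql" := by decide
  have a2 : "skill_" ++ "sql" = "skill_sql" := by decide
  have l3 : PySem.Str.lower "Java" = "java" := by decide
  have k3 : PySem.Str.replace "java" " " "_" = "java" := by decide
  have a3 : "skill_" ++ "java" = "skill_java" := by decide
  have l4 : PySem.Str.lower "Deep Learning" = "deep learning" := by decide
  have k4 : PySem.Str.replace "deep learning" " " "_" = "deep_learning" := by decide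
  have a4 : "skill_" ++ "deep_learning" = "skill_deep_learning" := by decide
  have l5 : PySem.Str.lower "Communication" = "communication" := by decide
  have k5 : PySem.Str.replace "communication" " " "_" = "communication" := by decide
  have a5 : "skill_" ++ "communication" = "skill_communication" := by decide
  have l6 : PySem.Str.lower "Leadership" = "leadership" := by decide
  have k6 : PySem.Str.replace "leadership" " " "_" = "leadership" := by decide
  have a6 : "skill_" ++ "leadership" = "skill_leadership" := by decide
  have l7 : PySem.Str.lower "Project Management" = "project management" := by decide
  have k7 : PySem.Str.replace "project management" " " "_" = "project_management" := by decide
  have a7 : "skill_" ++ "project_management" = "skill_project_management" := by decide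
  have l8 : PySem.Str.lower "Data Analysis" = "data analysis" := by decide
  have k8 : PySem.Str.replace "data analysis" " " "_" = "data_analysis" := by decide
  have a8 : "skill_" ++ "data_analysis" = "skill_data_analysis" := by decide
  simp [pvSkillsA, pvCanon, pvMem, PySem.Dict.insert, PySem.Dict.empty, PySem.Dict.contains,
        PySem.Set.contains_eq_listContains, PySem.Set.mem_ofList,
        l0, k0, a0, l1, k1, a1, l2, k2, a2, l3, k3, a3, l4, k4, a4, l5, k5, a5, l6, k6, a6, l7, k7, a7, l8, k8, a8]

lemma B_init :
    (PySem.Dict.values pvSkillKey).foldl (fun d k => d.insert k (0 : Int)) PySem.Dict.empty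
    = pvCanon 0 0 0 0 0 0 0 0 0 := by decide

lemma pvIns0 (a b c d e f g h i : Int) :
    (pvCanon a b c d e f g h i).insert "skill_python" (1 : Int) = pvCanon (1 : Int) b c d e f g h i := by
  simp [pvCanon, PySem.Dict.insert, PySem.Dict.contains]

lemma pvGet0 : pvSkillKey.get? "python" = some "skill_python" := by decide

lemma pvIns1 (a b c d e f g h i : Int) :
    (pvCanon a b c d e f g h i).insert "skill_machine_learning" (1 : Int) = pvCanon a (1 : Int) c d e f g h i := by
  simp [pvCanon, PySem.Dict.insert, PySem.Dict.contains]

lemma pvGet1 : pvSkillKey.get? "machine learning" = some "skill_machine_learning" := by decide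

lemma pvIns2 (a b c d e f g h i : Int) :
    (pvCanon a b c d e f g h i).insert "skill_sql" (1 : Int) = pvCanon a b (1 : Int) d e f g h i := by
  simp [pvCanon, PySem.Dict.insert, PySem.Dict.contains]

lemma pvGet2 : pvSkillKey.get? "sql" = some "skill_sql" := by decide

lemma pvIns3 (a b c d e f g h i : Int) :
    (pvCanon a b c d e f g h i).insert "skill_java" (1 : Int) = pvCanon a b c (1 : Int) e f g h i := by
  simp [pvCanon, PySem.Dict.insert, PySem.Dict.contains]

lemma pvGet3 : pvSkillKey.get? "java" = some "skill_java" := by decide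

lemma pvIns4 (a b c d e f g h i : Int) :
    (pvCanon a b c d e f g h i).insert "skill_deep_learning" (1 : Int) = pvCanon a b c d (1 : Int) f g h i := by
  simp [pvCanon, PySem.Dict.insert, PySem.Dict.contains]

lemma pvGet4 : pvSkillKey.get? "deep learning" = some "skill_deep_learning" := by decide

lemma pvIns5 (a b c d e f g h i : Int) :
    (pvCanon a b c d e f g h i).insert "skill_communication" (1 : Int) = pvCanon a b c d e (1 : Int) g h i := by
  simp [pvCanon, PySem.Dict.insert, PySem.Dict.contains]

lemma pvGet5 : pvSkillKey.get? "communication" = some "skill_communication" := by decide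

lemma pvIns6 (a b c d e f g h i : Int) :
    (pvCanon a b c d e f g h i).insert "skill_leadership" (1 : Int) = pvCanon a b c d e f (1 : Int) h i := by
  simp [pvCanon, PySem.Dict.insert, PySem.Dict.contains]

lemma pvGet6 : pvSkillKey.get? "leadership" = some "skill_leadership" := by decide

lemma pvIns7 (a b c d e f g h i : Int) :
    (pvCanon a b c d e f g h i).insert "skill_project_management" (1 : Int) = pvCanon a b c d e f g (1 : Int) i := by
  simp [pvCanon, PySem.Dict.insert, PySem.Dict.contains]

lemma pvGet7 : pvSkillKey.get? "project management" = some "skill_project_management" := by decide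

lemma pvIns8 (a b c d e f g h i : Int) :
    (pvCanon a b c d e f g h i).insert "skill_data_analysis" (1 : Int) = pvCanon a b c d e f g h (1 : Int) := by
  simp [pvCanon, PySem.Dict.insert, PySem.Dict.contains]

lemma pvGet8 : pvSkillKey.get? "data analysis" = some "skill_data_analysis" := by decide

lemma pvGetNone (n : String) (h0 : n ≠ "python") (h1 : n ≠ "machine learning") (h2 : n ≠ "sql") (h3 : n ≠ "java") (h4 : n ≠ "deep learning") (h5 : n ≠ "communication") (h6 : n ≠ "leadership") (h7 : n ≠ "project management") (h8 : n ≠ "data analysis") :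
    pvSkillKey.get? n = none := by
  have hK : pvSkillKey = PySem.Dict.mk
      [("python", "skill_python"), ("machine learning", "skill_machine_learning"), ("sql", "skill_sql"), ("java", "skill_java"), ("deep learning", "skill_deep_learning"), ("communication", "skill_communication"), ("leadership", "skill_leadership"), ("project management", "skill_project_management"), ("data analysis", "skill_data_analysis")] := by decide
  rw [hK]
  simp [PySem.Dict.get?, beq_iff_eq, Ne.symm h0, Ne.symm h1, Ne.symm h2, Ne.symm h3, Ne.symm h4, Ne.symm h5, Ne.symm h6, Ne.symm h7, Ne.symm h8]

lemma ite_mem_cons (x m : String) (l : List String) (a : Int) :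
    (if m ∈ l then (1 : Int) else if x = m then 1 else a) = (if m ∈ x :: l then 1 else a) := by
  by_cases h1 : m ∈ l <;> by_cases h2 : x = m <;>
    simp [List.mem_cons, h1, h2, Ne.symm]

lemma B_step (n : String) (a b c d e f g h i : Int) :
    (match pvSkillKey.get? n with
      | some k => (pvCanon a b c d e f g h i).insert k (1 : Int)
      | none => pvCanon a b c d e f g h i)
    = pvCanon (if n = "python" then 1 else a) (if n = "machine learning" then 1 else b) (if n = "sql" then 1 else c) (if n = "java" then 1 else d) (if n = "deep learning" then 1 else e) (if n = "communication" then 1 else f) (if n = "leadership" then 1 else g) (if n = "project management" then 1 else h) (if n = "data analysis" then 1 else i) := by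
  by_cases h0 : n = "python"
  · subst h0
    rw [pvGet0]
    show (pvCanon a b c d e f g h i).insert "skill_python" (1 : Int) = _
    rw [pvIns0]
    simp
  by_cases h1 : n = "machine learning"
  · subst h1
    rw [pvGet1]
    show (pvCanon a b c d e f g h i).insert "skill_machine_learning" (1 : Int) = _
    rw [pvIns1]
    simp
  by_cases h2 : n = "sql"
  · subst h2
    rw [pvGet2]
    show (pvCanon a b c d e f g h i).insert "skill_sql" (1 : Int) = _
    rw [pvIns2]
    simp
  by_cases h3 : n = "java"
  · subst h3
    rw [pvGet3]
    show (pvCanon a b c d e f g h i).insert "skill_java" (1 : Int) = _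
    rw [pvIns3]
    simp
  by_cases h4 : n = "deep learning"
  · subst h4
    rw [pvGet4]
    show (pvCanon a b c d e f g h i).insert "skill_deep_learning" (1 : Int) = _
    rw [pvIns4]
    simp
  by_cases h5 : n = "communication"
  · subst h5
    rw [pvGet5]
    show (pvCanon a b c d e f g h i).insert "skill_communication" (1 : Int) = _
    rw [pvIns5]
    simp
  by_cases h6 : n = "leadership"
  · subst h6
    rw [pvGet6]
    show (pvCanon a b c d e f g h i).insert "skill_leadership" (1 : Int) = _
    rw [pvIns6]
    simp
  by_cases h7 : n = "project management"
  · subst h7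
    rw [pvGet7]
    show (pvCanon a b c d e f g h i).insert "skill_project_management" (1 : Int) = _
    rw [pvIns7]
    simp
  by_cases h8 : n = "data analysis"
  · subst h8
    rw [pvGet8]
    show (pvCanon a b c d e f g h i).insert "skill_data_analysis" (1 : Int) = _
    rw [pvIns8]
    simp
  rw [pvGetNone n h0 h1 h2 h3 h4 h5 h6 h7 h8]
  simp [h0, h1, h2, h3, h4, h5, h6, h7, h8]

set_option maxHeartbeats 1000000 in
lemma B_loop (toks : List String) (a b c d e f g h i : Int) :
    toks.foldl (fun d token =>
      match pvSkillKey.get? (PySem.Str.lower (PySem.Str.strip token)) with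
      | some k => d.insert k (1 : Int)
      | none => d) (pvCanon a b c d e f g h i)
    = pvCanon
        (if "python" ∈ toks.map (fun t => PySem.Str.lower (PySem.Str.strip t)) then 1 else a)
        (if "machine learning" ∈ toks.map (fun t => PySem.Str.lower (PySem.Str.strip t)) then 1 else b)
        (if "sql" ∈ toks.map (fun t => PySem.Str.lower (PySem.Str.strip t)) then 1 else c)
        (if "java" ∈ toks.map (fun t => PySem.Str.lower (PySem.Str.strip t)) then 1 else d)
        (if "deep learning" ∈ toks.map (fun t => PySem.Str.lower (PySem.Str.strip t)) then 1 else e)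
        (if "communication" ∈ toks.map (fun t => PySem.Str.lower (PySem.Str.strip t)) then 1 else f)
        (if "leadership" ∈ toks.map (fun t => PySem.Str.lower (PySem.Str.strip t)) then 1 else g)
        (if "project management" ∈ toks.map (fun t => PySem.Str.lower (PySem.Str.strip t)) then 1 else h)
        (if "data analysis" ∈ toks.map (fun t => PySem.Str.lower (PySem.Str.strip t)) then 1 else i) := by
  induction toks generalizing a b c d e f g h i with
  | nil => simp
  | cons t ts ih =>
    simp only [List.foldl_cons, List.map_cons]
    rw [B_step, ih]
    simp only [ite_mem_cons]
    rfl

-- ===== VERDICT (by name: the statement is the Claim_ definition above) =====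
theorem extract_skill_flags_spec : Claim_equal_extract_skill_flags := by
  intro s _
  simp only [Spec_extract_skill_flags, extract_skill_flags, extract_skill_flags_alt]
  rw [A_canon, B_init, B_loop]
  simp [pvMem]
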